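-- pv_equiv track=rewrite | github.com/JunctionBudapest2019LinkedInHack/interview-app-backend-azure | PrepareDataForUser/__init__.py | splitAt
-- ===== SOURCE A (Python) =====
-- def splitAt(items, delimiter):
--   result = []
--   chunk = []
--   for item in items:
--     if item == delimiter:
--       result.append(chunk)
--       chunk = []
--     else:
--       chunk.append(item)
--
--   if chunk != []:
--     result.append(chunk)
--
--   return result
-- ===== SOURCE B (Python) =====
-- def splitAt(items, delimiter):
--     # Cut at the first delimiter occurrence, keep the left slice, continue on the rest;
--     # the final delimiter-free remainder is kept only if non-empty.
--     result = []
--     rest = items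
--     while delimiter in rest:
--         i = rest.index(delimiter)
--         result.append(rest[:i])
--         rest = rest[i + 1:]
--     if rest:
--         result.append(rest)
--     return result
-- ===== Notes on version B (the rewrite author's own statement) =====
-- stated objective: alternative
-- what changed: A builds chunks element by element with a running chunk accumulator and a trailing-chunk fixup; B instead repeatedly cuts the list at the first delimiter occurrence via index() and slicing, keeping the delimiter-free remainder only if non-empty.
import Mathlib
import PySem

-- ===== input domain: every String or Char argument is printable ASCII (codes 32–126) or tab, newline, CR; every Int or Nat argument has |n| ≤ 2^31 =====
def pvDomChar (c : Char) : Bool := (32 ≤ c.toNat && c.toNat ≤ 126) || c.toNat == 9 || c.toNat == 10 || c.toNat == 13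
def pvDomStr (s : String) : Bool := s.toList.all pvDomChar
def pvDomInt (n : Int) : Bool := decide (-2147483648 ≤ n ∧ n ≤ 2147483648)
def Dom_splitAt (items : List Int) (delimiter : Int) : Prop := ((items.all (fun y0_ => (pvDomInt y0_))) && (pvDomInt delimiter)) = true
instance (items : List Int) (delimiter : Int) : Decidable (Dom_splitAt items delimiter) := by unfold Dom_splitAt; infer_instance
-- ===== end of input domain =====

-- ===== PORT A =====
-- B replaces A's running-chunk accumulator loop by repeatedly cutting the list at the
-- first delimiter occurrence (objective: alternative decomposition, same behaviour and cost).
def splitAt (items : List Int) (delimiter : Int) : List (List Int) :=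
  let s := items.foldl
    (fun (st : List (List Int) × List Int) item =>
      if item == delimiter then (st.1 ++ [st.2], ([] : List Int))
      else (st.1, st.2 ++ [item]))
    (([] : List (List Int)), ([] : List Int))
  if s.2 ≠ [] then s.1 ++ [s.2] else s.1

-- ===== PORT B =====
-- termination helper: the index returned by items.index(delimiter) is < items.length
theorem pv_idx_lt {items : List Int} {delimiter : Int} {i : Nat}
    (h : PySem.List.index? items delimiter = some i) : i < items.length :=
  (List.idxOf?_eq_some_iff.mp h).1

def splitAt_alt (items : List Int) (delimiter : Int) : List (List Int) :=
  match h : PySem.List.index? items delimiter with   -- 'delimiter in items' + items.index(delimiter)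
  | some i =>
      PySem.List.slice items none (some (i : Int)) ::   -- items[:i]
        splitAt_alt (PySem.List.slice items (some ((i : Int) + 1)) none) delimiter  -- items[i+1:]
  | none => if items = [] then [] else [items]
termination_by items.length
decreasing_by
  have hi := pv_idx_lt h
  rw [PySem.List.slice_from _ (by omega)]
  simp only [List.length_drop]
  omega

-- ===== PRECONDITION & SPEC =====
def Spec_splitAt (items : List Int) (delimiter : Int) (out : List (List Int)) : Prop := out = splitAt_alt items delimiter
instance (items : List Int) (delimiter : Int) (out : List (List Int)) : Decidable (Spec_splitAt items delimiter out) := by unfold Spec_splitAt; infer_instance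

-- ===== CLAIM (what is proved, stated in full; the proofs are below) =====
def Claim_equal_splitAt : Prop := ∀ (items : List Int) (delimiter : Int), Dom_splitAt items delimiter → Spec_splitAt items delimiter (splitAt items delimiter)

-- ===== LEMMAS AND PROOFS =====

-- A's loop step and finalisation, named for the proofs
def pvStep (delimiter : Int) (st : List (List Int) × List Int) (item : Int) :
    List (List Int) × List Int :=
  if item == delimiter then (st.1 ++ [st.2], ([] : List Int)) else (st.1, st.2 ++ [item])

def pvFin (st : List (List Int) × List Int) : List (List Int) :=
  if st.2 ≠ [] then st.1 ++ [st.2] else st.1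

theorem splitAt_eq_fin (items : List Int) (delimiter : Int) :
    splitAt items delimiter = pvFin (items.foldl (pvStep delimiter) ([], [])) := rfl

theorem pv_foldl_cons_eq {x delimiter : Int} (xs : List Int)
    (res : List (List Int)) (c : List Int) (hx : x = delimiter) :
    (x :: xs).foldl (pvStep delimiter) (res, c) =
      xs.foldl (pvStep delimiter) (res ++ [c], []) := by
  simp [pvStep, hx]

theorem pv_foldl_cons_ne {x delimiter : Int} (xs : List Int)
    (res : List (List Int)) (c : List Int) (hx : x ≠ delimiter) :
    (x :: xs).foldl (pvStep delimiter) (res, c) =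
      xs.foldl (pvStep delimiter) (res, c ++ [x]) := by
  simp [pvStep, hx]

-- "prepend c to the first chunk (creating it if absent, dropping it if c = [])"
def pvH (c : List Int) : List (List Int) → List (List Int)
  | [] => if c = [] then [] else [c]
  | y :: ys => (c ++ y) :: ys

theorem pvH_comp (c x : List Int) (ys : List (List Int)) :
    pvH (c ++ x) ys = pvH c (pvH x ys) := by
  cases ys with
  | nil => by_cases hx : x = [] <;> by_cases hc : c = [] <;> simp [pvH, hx, hc]
  | cons y ys => simp [pvH]

-- A's accumulated result splits off as a prefix
theorem pv_foldl_res (delimiter : Int) :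
    ∀ (xs : List Int) (res : List (List Int)) (c : List Int),
      pvFin (xs.foldl (pvStep delimiter) (res, c)) =
        res ++ pvFin (xs.foldl (pvStep delimiter) ([], c)) := by
  intro xs
  induction xs with
  | nil => intro res c; by_cases hc : c = [] <;> simp [pvFin, hc]
  | cons x xs ih =>
    intro res c
    by_cases hx : x = delimiter
    · rw [pv_foldl_cons_eq xs res c hx, pv_foldl_cons_eq xs [] c hx,
          ih (res ++ [c]) [], ih ([] ++ [c]) []]
      simp
    · rw [pv_foldl_cons_ne xs res c hx, pv_foldl_cons_ne xs [] c hx, ih res (c ++ [x])]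

-- the running chunk acts on the final result through pvH
theorem pv_foldl_chunk (delimiter : Int) :
    ∀ (xs : List Int) (c : List Int),
      pvFin (xs.foldl (pvStep delimiter) ([], c)) =
        pvH c (pvFin (xs.foldl (pvStep delimiter) ([], []))) := by
  intro xs
  induction xs with
  | nil => intro c; by_cases hc : c = [] <;> simp [pvFin, pvH, hc]
  | cons x xs ih =>
    intro c
    by_cases hx : x = delimiter
    · rw [pv_foldl_cons_eq xs [] c hx, pv_foldl_cons_eq xs [] [] hx,
          pv_foldl_res delimiter xs ([] ++ [c]) [], pv_foldl_res delimiter xs ([] ++ [[]]) []]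
      cases pvFin (xs.foldl (pvStep delimiter) ([], [])) <;> simp [pvH]
    · rw [pv_foldl_cons_ne xs [] c hx, pv_foldl_cons_ne xs [] [] hx,
          ih (c ++ [x]), ih ([] ++ [x]), pvH_comp]
      simp

-- A's recursive characterisation
theorem splitAt_nil (delimiter : Int) : splitAt [] delimiter = [] := rfl

theorem splitAt_cons (x : Int) (xs : List Int) (delimiter : Int) :
    splitAt (x :: xs) delimiter =
      if x = delimiter then [] :: splitAt xs delimiter
      else pvH [x] (splitAt xs delimiter) := by
  rw [splitAt_eq_fin, splitAt_eq_fin]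
  by_cases hx : x = delimiter
  · rw [if_pos hx, pv_foldl_cons_eq xs [] [] hx, pv_foldl_res delimiter xs ([] ++ [[]]) []]
    simp
  · rw [if_neg hx, pv_foldl_cons_ne xs [] [] hx]
    have := pv_foldl_chunk delimiter xs ([] ++ [x])
    simpa using this

-- B's closed unfolding equations
theorem splitAt_alt_eq_some {items : List Int} {delimiter : Int} {i : Nat}
    (h : PySem.List.index? items delimiter = some i) :
    splitAt_alt items delimiter =
      PySem.List.slice items none (some (i : Int)) ::
        splitAt_alt (PySem.List.slice items (some ((i : Int) + 1)) none) delimiter := by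
  rw [splitAt_alt]
  split
  · next i' heq => rw [h] at heq; injection heq with hi; subst hi; rfl
  · next heq => rw [h] at heq; cases heq

theorem splitAt_alt_eq_none {items : List Int} {delimiter : Int}
    (h : PySem.List.index? items delimiter = none) :
    splitAt_alt items delimiter = if items = [] then [] else [items] := by
  rw [splitAt_alt]
  split
  · next i' heq => rw [h] at heq; cases heq
  · next heq => rfl

-- B's recursive characterisation
theorem splitAt_alt_nil (delimiter : Int) : splitAt_alt [] delimiter = [] := by
  rw [splitAt_alt_eq_none (by simp [PySem.List.index?])]
  simp

theorem splitAt_alt_cons (x : Int) (xs : List Int) (delimiter : Int) :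
    splitAt_alt (x :: xs) delimiter =
      if x = delimiter then [] :: splitAt_alt xs delimiter
      else pvH [x] (splitAt_alt xs delimiter) := by
  by_cases hx : x = delimiter
  · have hidx : PySem.List.index? (x :: xs) delimiter = some 0 := by
      simp [PySem.List.index?, List.idxOf?_cons, hx]
    rw [splitAt_alt_eq_some hidx, if_pos hx,
        PySem.List.slice_to _ (by omega), PySem.List.slice_from _ (by omega)]
    simp
  · have hxb : (x == delimiter) = false := by simp [hx]
    rw [if_neg hx]
    cases hj : PySem.List.index? xs delimiter with
    | some j =>
      have hj' : List.idxOf? delimiter xs = some j := hj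
      have hidx : PySem.List.index? (x :: xs) delimiter = some (j + 1) := by
        simp [PySem.List.index?, List.idxOf?_cons, hxb, hj']
      rw [splitAt_alt_eq_some hidx, splitAt_alt_eq_some hj,
          PySem.List.slice_to _ (by omega), PySem.List.slice_to _ (by omega),
          PySem.List.slice_from _ (by omega), PySem.List.slice_from _ (by omega)]
      have h1 : ((((j : Nat) + 1 : Nat) : Int)).toNat = j + 1 := by omega
      have h2 : ((((j : Nat) + 1 : Nat) : Int) + 1).toNat = j + 2 := by omega
      have h3 : ((j : Int)).toNat = j := by omega
      have h4 : ((j : Int) + 1).toNat = j + 1 := by omega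
      rw [h1, h2, h3, h4]
      simp [pvH]
    | none =>
      have hj' : List.idxOf? delimiter xs = none := hj
      have hidx : PySem.List.index? (x :: xs) delimiter = none := by
        simp [PySem.List.index?, List.idxOf?_cons, hxb, hj']
      rw [splitAt_alt_eq_none hidx, splitAt_alt_eq_none hj]
      cases xs <;> simp [pvH]

theorem splitAt_eq_alt (items : List Int) (delimiter : Int) :
    splitAt items delimiter = splitAt_alt items delimiter := by
  induction items with
  | nil => rw [splitAt_nil, splitAt_alt_nil]
  | cons x xs ih => rw [splitAt_cons, splitAt_alt_cons, ih]

-- ===== VERDICT (by name: the statement is the Claim_ definition above) =====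
theorem splitAt_spec : Claim_equal_splitAt := by
  intro items delimiter _
  unfold Spec_splitAt
  exact splitAt_eq_alt items delimiter
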